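-- pv_equiv track=rewrite | github.com/RAYYAN-MIRZA/Agent | latestAgent2.py | find_existing_key_by_mac_or_ip
-- ===== SOURCE A (Python) =====
-- from typing import Dict, Tuple, List
--
-- def find_existing_key_by_mac_or_ip(devices: Dict[str, dict], mac: str, ip: str) -> str:
--     mac_norm = (mac or "").lower()
--     # prefer exact mac match
--     if mac_norm:
--         for k, v in devices.items():
--             if v.get("mac", "").lower() == mac_norm:
--                 return k
--     # fallback: match by IP
--     for k, v in devices.items():
--         if v.get("ip") == ip:
--             return k
--     return ""
-- ===== SOURCE B (Python) =====
-- def find_existing_key_by_mac_or_ip(devices, mac, ip):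
--     mac_norm = (mac or "").lower()
--     pending = None
--     for k, v in devices.items():
--         if mac_norm and v.get("mac", "").lower() == mac_norm:
--             return k
--         if pending is None and v.get("ip") == ip:
--             pending = k
--     return pending if pending is not None else ""
-- ===== Notes on version B (the rewrite author's own statement) =====
-- stated objective: alternative
-- what changed: B merges A's two sequential scans over devices into a single pass that returns on the first MAC match and records the first IP match as a pending fallback.
import Mathlib
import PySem

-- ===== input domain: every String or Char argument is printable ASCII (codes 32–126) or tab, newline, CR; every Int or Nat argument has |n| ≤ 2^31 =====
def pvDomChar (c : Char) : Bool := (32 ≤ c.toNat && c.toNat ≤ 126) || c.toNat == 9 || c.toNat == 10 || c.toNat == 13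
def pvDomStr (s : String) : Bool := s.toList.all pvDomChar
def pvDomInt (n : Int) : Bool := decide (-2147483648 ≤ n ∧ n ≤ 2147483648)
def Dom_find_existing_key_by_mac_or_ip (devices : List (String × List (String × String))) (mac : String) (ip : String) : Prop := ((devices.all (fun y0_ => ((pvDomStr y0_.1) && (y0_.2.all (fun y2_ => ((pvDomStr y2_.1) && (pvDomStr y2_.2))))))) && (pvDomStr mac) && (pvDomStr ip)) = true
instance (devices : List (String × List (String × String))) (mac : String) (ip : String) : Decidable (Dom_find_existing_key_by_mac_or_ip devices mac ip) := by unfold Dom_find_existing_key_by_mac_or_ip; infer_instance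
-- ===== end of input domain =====

-- B merges A's two scans over devices into one pass with a pending IP fallback (alternative decomposition).


-- ===== PORT A =====
-- first key whose value's "mac" (default "") lowercased equals macn
def pvFindMacA (devices : List (String × List (String × String))) (macn : String) : Option String :=
  match devices with
  | [] => none
  | (k, v) :: rest =>
    if PySem.Str.lower (PySem.Dict.getD (PySem.Dict.mk v) "mac" "") == macn then some k
    else pvFindMacA rest macn

-- first key whose value's "ip" equals ip (missing key never matches a str)
def pvFindIpA (devices : List (String × List (String × String))) (ip : String) : Option String :=
  match devices with
  | [] => none
  | (k, v) :: rest =>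
    if PySem.Dict.get? (PySem.Dict.mk v) "ip" == some ip then some k
    else pvFindIpA rest ip

def find_existing_key_by_mac_or_ip (devices : List (String × List (String × String))) (mac : String) (ip : String) : String :=
  let mac_norm := PySem.Str.lower mac
  match (if mac_norm != "" then pvFindMacA devices mac_norm else none) with
  | some k => k
  | none =>
    match pvFindIpA devices ip with
    | some k => k
    | none => ""

-- ===== PORT B =====
-- B: one pass; return on MAC match, remember first IP match as pending fallback
def pvLoopB (devices : List (String × List (String × String))) (macn ip : String) (pending : Option String) : String :=
  match devices with
  | [] => pending.getD ""
  | (k, v) :: rest =>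
    if macn != "" && PySem.Str.lower (PySem.Dict.getD (PySem.Dict.mk v) "mac" "") == macn then k
    else pvLoopB rest macn ip
      (if pending.isNone && PySem.Dict.get? (PySem.Dict.mk v) "ip" == some ip then some k else pending)

def find_existing_key_by_mac_or_ip_alt (devices : List (String × List (String × String))) (mac : String) (ip : String) : String :=
  pvLoopB devices (PySem.Str.lower mac) ip none

-- ===== PRECONDITION & SPEC =====
def Spec_find_existing_key_by_mac_or_ip (devices : List (String × List (String × String))) (mac : String) (ip : String) (out : String) : Prop := out = find_existing_key_by_mac_or_ip_alt devices mac ip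
instance (devices : List (String × List (String × String))) (mac : String) (ip : String) (out : String) : Decidable (Spec_find_existing_key_by_mac_or_ip devices mac ip out) := by unfold Spec_find_existing_key_by_mac_or_ip; infer_instance

-- ===== CLAIM (what is proved, stated in full; the proofs are below) =====
def Claim_equal_find_existing_key_by_mac_or_ip : Prop := ∀ (devices : List (String × List (String × String))) (mac : String) (ip : String), Dom_find_existing_key_by_mac_or_ip devices mac ip → Spec_find_existing_key_by_mac_or_ip devices mac ip (find_existing_key_by_mac_or_ip devices mac ip)

-- ===== LEMMAS AND PROOFS =====

-- ===== VERDICT (by name: the statement is the Claim_ definition above) =====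
lemma pvLoopB_empty (devices : List (String × List (String × String))) (ip : String)
    (p : Option String) :
    pvLoopB devices "" ip p = (p.orElse (fun _ => pvFindIpA devices ip)).getD "" := by
  induction devices generalizing p with
  | nil => cases p <;> rfl
  | cons kv rest ih =>
    obtain ⟨k, v⟩ := kv
    simp only [pvLoopB, bne_self_eq_false, Bool.false_and, Bool.false_eq_true, if_false]
    rw [ih]
    cases p with
    | some a => rfl
    | none =>
      by_cases hip : (PySem.Dict.get? (PySem.Dict.mk v) "ip" == some ip) = true
      · simp [pvFindIpA, hip, Option.orElse]
      · simp only [Bool.not_eq_true] at hip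
        simp [pvFindIpA, hip, Option.orElse]

lemma pvLoopB_ne (devices : List (String × List (String × String))) (macn ip : String)
    (hm : macn ≠ "") (p : Option String) :
    pvLoopB devices macn ip p =
      match pvFindMacA devices macn with
      | some k => k
      | none => (p.orElse (fun _ => pvFindIpA devices ip)).getD "" := by
  induction devices generalizing p with
  | nil => cases p <;> simp [pvLoopB, pvFindMacA, pvFindIpA]
  | cons kv rest ih =>
    obtain ⟨k, v⟩ := kv
    have hb : (macn != "") = true := by simpa using hm
    by_cases hmac : (PySem.Str.lower (PySem.Dict.getD (PySem.Dict.mk v) "mac" "") == macn) = true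
    · simp [pvLoopB, pvFindMacA, hb, hmac]
    · simp only [Bool.not_eq_true] at hmac
      simp only [pvLoopB, pvFindMacA, hb, hmac, Bool.true_and, Bool.false_eq_true, if_false]
      rw [ih]
      cases hfm : pvFindMacA rest macn with
      | some a => rfl
      | none =>
        cases p with
        | some a => rfl
        | none =>
          by_cases hip : (PySem.Dict.get? (PySem.Dict.mk v) "ip" == some ip) = true
          · simp [pvFindIpA, hip, Option.orElse]
          · simp only [Bool.not_eq_true] at hip
            simp [pvFindIpA, hip, Option.orElse]

theorem find_existing_key_by_mac_or_ip_spec : Claim_equal_find_existing_key_by_mac_or_ip := by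
  intro devices mac ip _
  unfold Spec_find_existing_key_by_mac_or_ip find_existing_key_by_mac_or_ip
    find_existing_key_by_mac_or_ip_alt
  by_cases hm : PySem.Str.lower mac = ""
  · rw [hm, pvLoopB_empty]
    simp [Option.orElse]
    cases pvFindIpA devices ip <;> simp
  · rw [pvLoopB_ne devices _ ip hm]
    have hb : (PySem.Str.lower mac != "") = true := by simpa using hm
    simp only [hb, if_true]
    cases pvFindMacA devices (PySem.Str.lower mac) with
    | some k => rfl
    | none => simp [Option.orElse]; cases pvFindIpA devices ip <;> simp
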